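-- pv_equiv track=rewrite | github.com/sagajc03/ProyectoCalculo | signosdescartes.py | xnegada
-- ===== SOURCE A (Python) =====
-- def xnegada(x,n):
--     xn=[]
--     for i in range(0,len(x)):
--         if n % 2 == 0:
--             if i % 2 == 0:
--                 xn.append(x[i])
--             else:
--                 xn.append(x[i]*-1)
--         else:
--             if i % 2 != 0:
--                 xn.append(x[i])
--             else:
--                 xn.append(x[i]*-1)
--     return xn
-- ===== SOURCE B (Python) =====
-- def xnegada(x, n):
--     # Consume the list two elements at a time with a FIXED (a, b) multiplier
--     # pair chosen once from n's parity: no per-element parity test, no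
--     # toggling sign state.
--     a, b = (1, -1) if n % 2 == 0 else (-1, 1)
--     xn = []
--     i = 0
--     while i + 1 < len(x):
--         xn += [x[i] * a, x[i + 1] * b]
--         i += 2
--     if i < len(x):
--         xn.append(x[i] * a)
--     return xn
-- ===== Notes on version B (the rewrite author's own statement) =====
-- stated objective: alternative
-- what changed: Replaces the indexed loop with per-element parity tests by a loop that consumes two elements per step with a fixed (keep, negate) multiplier pair chosen once from n's parity, plus a trailing-element case; no per-element modulo, no toggling state.
import Mathlib
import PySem

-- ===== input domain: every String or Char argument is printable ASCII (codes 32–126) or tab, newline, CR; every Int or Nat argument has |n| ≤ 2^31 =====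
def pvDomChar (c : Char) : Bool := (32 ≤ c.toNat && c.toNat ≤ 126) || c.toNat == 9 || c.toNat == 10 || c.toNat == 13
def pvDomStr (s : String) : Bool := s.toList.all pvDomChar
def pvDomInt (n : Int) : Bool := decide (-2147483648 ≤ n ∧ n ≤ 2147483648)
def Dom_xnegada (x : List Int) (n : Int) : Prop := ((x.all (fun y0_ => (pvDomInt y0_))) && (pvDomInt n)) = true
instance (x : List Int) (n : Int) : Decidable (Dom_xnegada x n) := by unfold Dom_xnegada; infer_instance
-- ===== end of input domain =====

-- B replaces the indexed loop with per-element parity tests by a recursion consuming two elements per step with a fixed multiplier pair (alternative decomposition; same cost).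


-- ===== PORT A =====
-- for i in range(0, len(x)): nested parity tests on n and i, appending x[i] or x[i]*-1
def xnegada (x : List Int) (n : Int) : List Int :=
  (PySem.List.pyRange 0 (x.length : Int) 1).foldl
    (fun xn i =>
      if PySem.Int.mod n 2 = 0 then
        if PySem.Int.mod i 2 = 0 then
          xn ++ [PySem.List.pyGetD x i 0]
        else
          xn ++ [PySem.List.pyGetD x i 0 * -1]
      else
        if PySem.Int.mod i 2 ≠ 0 then
          xn ++ [PySem.List.pyGetD x i 0]
        else
          xn ++ [PySem.List.pyGetD x i 0 * -1]) []

-- ===== PORT B =====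
-- while i + 1 < len(x): emit x[i]*a, x[i+1]*b; i += 2; trailing x[i]*a if one left.
-- (indices are in range by the loop guards, so List.getD is exact for x[i])
def pvGoIdx (x : List Int) (a b : Int) (i : Nat) : List Int :=
  if i + 1 < x.length then
    x.getD i 0 * a :: x.getD (i + 1) 0 * b :: pvGoIdx x a b (i + 2)
  else if i < x.length then [x.getD i 0 * a] else []
termination_by x.length - i

-- a, b = (1, -1) if n % 2 == 0 else (-1, 1); loop from i = 0
def xnegada_alt (x : List Int) (n : Int) : List Int :=
  if PySem.Int.mod n 2 = 0 then pvGoIdx x 1 (-1) 0 else pvGoIdx x (-1) 1 0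

-- ===== PRECONDITION & SPEC =====
def Spec_xnegada (x : List Int) (n : Int) (out : List Int) : Prop := out = xnegada_alt x n
instance (x : List Int) (n : Int) (out : List Int) : Decidable (Spec_xnegada x n out) := by unfold Spec_xnegada; infer_instance

-- ===== CLAIM (what is proved, stated in full; the proofs are below) =====
def Claim_equal_xnegada : Prop := ∀ (x : List Int) (n : Int), Dom_xnegada x n → Spec_xnegada x n (xnegada x n)

-- ===== LEMMAS AND PROOFS =====

-- common functional form: alternate signs starting with s
def pvAlt : List Int → Int → List Int
  | [], _ => []
  | e :: t, s => e * s :: pvAlt t (-s)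

-- the sign after k steps
def pvSk (k : Nat) : Int := if k % 2 = 0 then 1 else -1

theorem pvSk_succ (k : Nat) : pvSk (k + 1) = -pvSk k := by
  unfold pvSk
  rcases Nat.even_or_odd k with h | h
  · simp [Nat.even_iff.mp h, Nat.succ_mod_two_eq_one_iff.mpr (Nat.even_iff.mp h)]
  · simp [Nat.odd_iff.mp h, Nat.succ_mod_two_eq_zero_iff.mpr (Nat.odd_iff.mp h)]

-- chunk-of-two functional form of B's loop, and its bridges
def pvGo (xs : List Int) (a b : Int) : List Int :=
  match xs with
  | [] => []
  | [e] => [e * a]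
  | e :: f :: t => e * a :: f * b :: pvGo t a b

theorem pvGoIdx_eq_go_aux (x : List Int) (a b : Int) :
    ∀ (d i : Nat), x.length - i ≤ d → pvGoIdx x a b i = pvGo (x.drop i) a b := by
  intro d
  induction d with
  | zero =>
      intro i hd
      have hnil : x.drop i = [] := List.drop_eq_nil_of_le (by omega)
      rw [pvGoIdx, if_neg (by omega), if_neg (by omega), hnil]
      rfl
  | succ d ih =>
    intro i hd
    rw [pvGoIdx]
    by_cases h1 : i + 1 < x.length
    · have hi : i < x.length := by omega
      have hd1 : x.drop i = x[i] :: x.drop (i + 1) := List.drop_eq_getElem_cons hi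
      have hd2 : x.drop (i + 1) = x[i + 1] :: x.drop (i + 2) := List.drop_eq_getElem_cons h1
      rw [if_pos h1, ih (i + 2) (by omega), hd1, hd2]
      simp [pvGo, List.getD_eq_getElem?_getD, hi, h1]
    · by_cases h0 : i < x.length
      · have hd1 : x.drop i = x[i] :: x.drop (i + 1) := List.drop_eq_getElem_cons h0
        have hnil : x.drop (i + 1) = [] := List.drop_eq_nil_of_le (by omega)
        rw [if_neg h1, if_pos h0, hd1, hnil]
        simp [pvGo, List.getD_eq_getElem?_getD, h0]
      · have hnil : x.drop i = [] := List.drop_eq_nil_of_le (by omega)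
        rw [if_neg h1, if_neg h0, hnil]
        rfl

theorem pvGoIdx_zero (x : List Int) (a b : Int) : pvGoIdx x a b 0 = pvGo x a b := by
  rw [pvGoIdx_eq_go_aux x a b x.length 0 (by omega), List.drop_zero]

theorem pvB_alt_eq_go : ∀ (xs : List Int) (s : Int), pvAlt xs s = pvGo xs s (-s)
  | [], _ => rfl
  | [_], _ => rfl
  | e :: f :: t, s => by
      simp only [pvAlt, pvGo, neg_neg]
      rw [pvB_alt_eq_go t s]

theorem pvA_loop (x : List Int) (n : Int) :
    ∀ (d k : Nat) (acc : List Int), x.length - k = d → k ≤ x.length →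
    (PySem.List.pyRange (k : Int) (x.length : Int) 1).foldl
      (fun xn i =>
        if PySem.Int.mod n 2 = 0 then
          if PySem.Int.mod i 2 = 0 then
            xn ++ [PySem.List.pyGetD x i 0]
          else
            xn ++ [PySem.List.pyGetD x i 0 * -1]
        else
          if PySem.Int.mod i 2 ≠ 0 then
            xn ++ [PySem.List.pyGetD x i 0]
          else
            xn ++ [PySem.List.pyGetD x i 0 * -1]) acc
      = acc ++ pvAlt (x.drop k) ((if PySem.Int.mod n 2 = 0 then 1 else -1) * pvSk k) := by
  intro d
  induction d with
  | zero =>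
      intro k acc hd hk
      have hk' : k = x.length := by omega
      subst hk'
      rw [PySem.List.pyRange_one_eq_nil (by omega)]
      simp [pvAlt]
  | succ d ih =>
      intro k acc hd hk
      have hlt : k < x.length := by omega
      rw [PySem.List.pyRange_one_cons (by exact_mod_cast hlt)]
      simp only [List.foldl_cons]
      have hget : PySem.List.pyGetD x (k : Int) 0 = x[k] := by
        simp [PySem.List.pyGetD_natCast, List.getD_eq_getElem?_getD, hlt]
      have hmodk : PySem.Int.mod (k : Int) 2 = ((k % 2 : Nat) : Int) :=
        PySem.Int.mod_natCast k 2
      have hdrop : x.drop k = x[k] :: x.drop (k + 1) := List.drop_eq_getElem_cons hlt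
      have hcast : ((k : Int) + 1) = ((k + 1 : Nat) : Int) := by push_cast; ring
      have hstep := ih (k + 1) (acc ++ [x[k] * ((if PySem.Int.mod n 2 = 0 then 1 else -1) * pvSk k)])
        (by omega) (by omega)
      rw [hcast]
      have hval :
          (if PySem.Int.mod n 2 = 0 then
            if PySem.Int.mod (k : Int) 2 = 0 then acc ++ [PySem.List.pyGetD x (k : Int) 0]
            else acc ++ [PySem.List.pyGetD x (k : Int) 0 * -1]
          else
            if PySem.Int.mod (k : Int) 2 ≠ 0 then acc ++ [PySem.List.pyGetD x (k : Int) 0]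
            else acc ++ [PySem.List.pyGetD x (k : Int) 0 * -1])
          = acc ++ [x[k] * ((if PySem.Int.mod n 2 = 0 then 1 else -1) * pvSk k)] := by
        rw [hget, hmodk]
        unfold pvSk
        rcases Nat.even_or_odd k with h | h
        · rw [Nat.even_iff.mp h]
          norm_num
          split_ifs <;> norm_num
        · rw [Nat.odd_iff.mp h]
          norm_num
          split_ifs <;> norm_num
      rw [hval, hstep, hdrop]
      have hs : (if PySem.Int.mod n 2 = 0 then (1:Int) else -1) * pvSk (k + 1)
          = -((if PySem.Int.mod n 2 = 0 then (1:Int) else -1) * pvSk k) := by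
        rw [pvSk_succ]; ring
      rw [hs]
      simp [pvAlt]

-- ===== VERDICT (by name: the statement is the Claim_ definition above) =====
theorem xnegada_spec : Claim_equal_xnegada := by
  intro x n _
  unfold Spec_xnegada xnegada xnegada_alt
  have h := pvA_loop x n x.length 0 [] (by omega) (by omega)
  have hs0 : pvSk 0 = 1 := rfl
  simp only [Nat.cast_zero, List.drop_zero, hs0, mul_one, List.nil_append] at h
  rw [h, pvB_alt_eq_go]
  simp only [pvGoIdx_zero]
  split_ifs <;> norm_num
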